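-- pv_equiv track=rewrite | github.com/Adailton31/Curso-Python-3 | print.py | numeros_terminados_em
-- ===== SOURCE A (Python) =====
-- def numeros_terminados_em(n, max_num, quantidade=6):
--     numeros = []
--     for i in range(max_num + 1):  # Gere números de 0 a max_num
--         if i % 10 == n:  # Verifique se o número termina com o valor desejado
--             numeros.append(i)
--             if len(numeros) == quantidade:  # Se encontrou a quantidade desejada de números que terminam em n, pare
--                 break
--     return numeros
-- ===== SOURCE B (Python) =====
-- def numeros_terminados_em(n, max_num, quantidade=6):
--     if not (0 <= n <= 9) or max_num < n:
--         return []
--     count = (max_num - n) // 10 + 1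
--     if 1 <= quantidade < count:
--         count = quantidade
--     return [n + 10 * k for k in range(count)]
-- ===== Notes on version B (the rewrite author's own statement) =====
-- stated objective: faster
-- what changed: Replaces the scan of all integers 0..max_num with a closed-form arithmetic sequence n, n+10, ... whose length min((max_num-n)//10+1, quantidade) is computed directly.
import Mathlib
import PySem

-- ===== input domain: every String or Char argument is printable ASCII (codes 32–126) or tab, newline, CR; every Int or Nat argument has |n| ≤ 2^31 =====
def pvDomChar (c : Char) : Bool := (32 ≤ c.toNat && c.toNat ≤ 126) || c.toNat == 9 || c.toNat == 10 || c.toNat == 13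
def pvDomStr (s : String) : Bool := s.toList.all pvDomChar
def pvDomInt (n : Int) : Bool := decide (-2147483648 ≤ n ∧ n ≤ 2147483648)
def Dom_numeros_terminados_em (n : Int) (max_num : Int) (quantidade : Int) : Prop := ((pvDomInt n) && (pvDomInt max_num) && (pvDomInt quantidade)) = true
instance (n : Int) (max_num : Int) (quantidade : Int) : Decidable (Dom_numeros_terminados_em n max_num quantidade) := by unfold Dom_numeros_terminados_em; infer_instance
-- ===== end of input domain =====

-- B replaces A's scan over 0..max_num by the directly generated arithmetic sequence (objective: faster).

-- ===== PORT A =====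
-- the for-loop with its break, as structural recursion over the range list
def numerosLoopA (n : Int) (quantidade : Int) : List Int → List Int → List Int
  | [], numeros => numeros
  | i :: rest, numeros =>
    if PySem.Int.mod i 10 = n then
      let numeros' := numeros ++ [i]
      if (numeros'.length : Int) = quantidade then numeros'
      else numerosLoopA n quantidade rest numeros'
    else numerosLoopA n quantidade rest numeros

def numeros_terminados_em (n : Int) (max_num : Int) (quantidade : Int) : List Int :=
  numerosLoopA n quantidade (PySem.List.pyRange 0 (max_num + 1) 1) []

-- ===== PORT B =====
def numeros_terminados_em_alt (n : Int) (max_num : Int) (quantidade : Int) : List Int :=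
  if ¬(0 ≤ n ∧ n ≤ 9) ∨ max_num < n then []
  else
    let count := PySem.Int.floordiv (max_num - n) 10 + 1
    let count := if 1 ≤ quantidade ∧ quantidade < count then quantidade else count
    (PySem.List.pyRange 0 count 1).map (fun k => n + 10 * k)

-- ===== PRECONDITION & SPEC =====
def Spec_numeros_terminados_em (n : Int) (max_num : Int) (quantidade : Int) (out : List Int) : Prop := out = numeros_terminados_em_alt n max_num quantidade
instance (n : Int) (max_num : Int) (quantidade : Int) (out : List Int) : Decidable (Spec_numeros_terminados_em n max_num quantidade out) := by unfold Spec_numeros_terminados_em; infer_instance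

-- ===== CLAIM (what is proved, stated in full; the proofs are below) =====
def Claim_equal_numeros_terminados_em : Prop := ∀ (n : Int) (max_num : Int) (quantidade : Int), Dom_numeros_terminados_em n max_num quantidade → Spec_numeros_terminados_em n max_num quantidade (numeros_terminados_em n max_num quantidade)

-- ===== LEMMAS AND PROOFS =====

-- the loop never breaks when quantidade ≤ 0: it is filter
theorem loopA_of_nonpos (n quantidade : Int) (hq : quantidade ≤ 0) :
    ∀ (l acc : List Int), numerosLoopA n quantidade l acc =
      acc ++ l.filter (fun i => decide (PySem.Int.mod i 10 = n)) := by
  intro l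
  induction l with
  | nil => intro acc; simp [numerosLoopA]
  | cons i rest ih =>
    intro acc
    by_cases h : PySem.Int.mod i 10 = n
    · have h' : i % 10 = n := by simpa using h
      have hne : ¬((acc.length : Int) + 1 = quantidade) := by omega
      simp [numerosLoopA, h', hne, ih]
    · have h' : ¬(i % 10 = n) := by simpa using h
      simp [numerosLoopA, h', ih]

-- the loop with a positive budget: take (quantidade - acc.length) of the filtered rest
theorem loopA_of_pos (n quantidade : Int) :
    ∀ (l acc : List Int), (acc.length : Int) < quantidade →
      numerosLoopA n quantidade l acc =
        acc ++ (l.filter (fun i => decide (PySem.Int.mod i 10 = n))).take (quantidade - acc.length).toNat := by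
  intro l
  induction l with
  | nil => intro acc _; simp [numerosLoopA]
  | cons i rest ih =>
    intro acc hlt
    simp only [numerosLoopA]
    by_cases h : PySem.Int.mod i 10 = n
    · rw [if_pos h]
      have hpfil : List.filter (fun j => decide (PySem.Int.mod j 10 = n)) (i :: rest)
          = i :: List.filter (fun j => decide (PySem.Int.mod j 10 = n)) rest := by
        rw [List.filter_cons_of_pos (by simpa using h)]
      by_cases hb : ((acc ++ [i]).length : Int) = quantidade
      · rw [if_pos hb, hpfil]
        have h1 : (quantidade - (acc.length : Int)).toNat = 1 := by
          simp only [List.length_append, List.length_cons, List.length_nil] at hb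
          omega
        rw [h1]
        simp
      · rw [if_neg hb, ih _ ?_, hpfil]
        · have htn : (quantidade - (acc.length : Int)).toNat
              = (quantidade - ((acc ++ [i]).length : Int)).toNat + 1 := by
            simp only [List.length_append, List.length_cons, List.length_nil] at hb ⊢
            omega
          rw [htn, List.take_succ_cons]
          simp
        · simp only [List.length_append, List.length_cons, List.length_nil] at hb ⊢
          omega
    · rw [if_neg h, ih _ hlt,
        List.filter_cons_of_neg (by simpa using h)]

-- filtering range 0..m for residue n gives the arithmetic sequence of length (m - n + 9).ediv 10
theorem filter_range_mod (n : Int) (hn0 : 0 ≤ n) (hn9 : n ≤ 9) :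
    ∀ (m : Nat), (PySem.List.pyRange 0 (m : Int) 1).filter (fun i => decide (PySem.Int.mod i 10 = n)) =
      (PySem.List.pyRange 0 (((m : Int) - n + 9) / 10) 1).map (fun k => n + 10 * k) := by
  intro m
  induction m with
  | zero =>
    rw [PySem.List.pyRange_one_eq_nil (by omega), PySem.List.pyRange_one_eq_nil (by push_cast; omega)]
    simp
  | succ m ih =>
    have hsplit : PySem.List.pyRange 0 ((m : Int) + 1) 1 = PySem.List.pyRange 0 (m : Int) 1 ++ [(m : Int)] :=
      PySem.List.pyRange_one_succ_right (by positivity)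
    push_cast
    rw [hsplit, List.filter_append, ih]
    by_cases h : (m : Int) % 10 = n
    · have hcnt : ((m : Int) + 1 - n + 9) / 10 = ((m : Int) - n + 9) / 10 + 1 := by omega
      have hval : n + 10 * (((m : Int) - n + 9) / 10) = (m : Int) := by omega
      rw [hcnt, PySem.List.pyRange_one_succ_right (by omega), List.map_append]
      simp [h, hval]
    · have hcnt : ((m : Int) + 1 - n + 9) / 10 = ((m : Int) - n + 9) / 10 := by omega
      simp [hcnt, h]

-- taking a prefix of the mapped range shortens the range
theorem take_map_pyRange (f : Int → Int) (c : Int) (t : Nat) :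
    ((PySem.List.pyRange 0 c 1).map f).take t = (PySem.List.pyRange 0 (min c (t : Int)) 1).map f := by
  by_cases hc : c ≤ 0
  · rw [PySem.List.pyRange_one_eq_nil hc, PySem.List.pyRange_one_eq_nil (by omega)]
    simp
  · by_cases h : c ≤ (t : Int)
    · rw [min_eq_left h, List.take_of_length_le]
      simp [PySem.List.length_pyRange_one]; omega
    · rw [min_eq_right (by omega), ← List.map_take,
        PySem.List.pyRange_one_append 0 (t : Int) c (by omega) (by omega), List.take_append,
        List.take_of_length_le (by simp [PySem.List.length_pyRange_one])]
      simp [PySem.List.length_pyRange_one]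

theorem alt_closed (n max_num quantidade : Int) :
    numeros_terminados_em_alt n max_num quantidade =
      if ¬(0 ≤ n ∧ n ≤ 9) ∨ max_num < n then []
      else (PySem.List.pyRange 0
        (if 1 ≤ quantidade ∧ quantidade < PySem.Int.floordiv (max_num - n) 10 + 1
         then quantidade else PySem.Int.floordiv (max_num - n) 10 + 1) 1).map (fun k => n + 10 * k) := rfl

theorem main_equiv (n max_num quantidade : Int) :
    numeros_terminados_em n max_num quantidade = numeros_terminados_em_alt n max_num quantidade := by
  unfold numeros_terminados_em
  rw [alt_closed]
  by_cases hn : 0 ≤ n ∧ n ≤ 9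
  · obtain ⟨hn0, hn9⟩ := hn
    have hfil : (PySem.List.pyRange 0 (max_num + 1) 1).filter (fun i => decide (PySem.Int.mod i 10 = n)) =
        (PySem.List.pyRange 0 ((max_num + 1 - n + 9) / 10) 1).map (fun k => n + 10 * k) := by
      by_cases hm : max_num + 1 ≤ 0
      · rw [PySem.List.pyRange_one_eq_nil hm, PySem.List.pyRange_one_eq_nil (by omega)]
        simp
      · have hcast : max_num + 1 = ((max_num + 1).toNat : Int) := by omega
        rw [hcast]
        exact filter_range_mod n hn0 hn9 (max_num + 1).toNat
    by_cases hlt : max_num < n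
    · -- empty result on both sides
      have ht : (max_num + 1 - n + 9) / 10 ≤ 0 := by omega
      have hfil0 : (PySem.List.pyRange 0 (max_num + 1) 1).filter (fun i => decide (PySem.Int.mod i 10 = n)) = [] := by
        rw [hfil, PySem.List.pyRange_one_eq_nil ht]; simp
      rw [if_pos (Or.inr hlt)]
      by_cases hq1 : 1 ≤ quantidade
      · rw [loopA_of_pos n quantidade _ [] (by simp; omega), hfil0]; simp
      · rw [loopA_of_nonpos n quantidade (by omega), hfil0]; simp
    · have hle : n ≤ max_num := by omega
      rw [if_neg (by omega)]
      have hcnt : (max_num + 1 - n + 9) / 10 = PySem.Int.floordiv (max_num - n) 10 + 1 := by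
        rw [PySem.Int.floordiv_eq_ediv_of_pos (by norm_num)]
        omega
      have hc0 : 1 ≤ PySem.Int.floordiv (max_num - n) 10 + 1 := by
        rw [PySem.Int.floordiv_eq_ediv_of_pos (by norm_num)]
        omega
      by_cases hq : 1 ≤ quantidade ∧ quantidade < PySem.Int.floordiv (max_num - n) 10 + 1
      · rw [if_pos hq, loopA_of_pos n quantidade _ [] (by simp; omega)]
        simp only [List.nil_append, List.length_nil, Nat.cast_zero, sub_zero]
        rw [hfil, hcnt, take_map_pyRange]
        have : min (PySem.Int.floordiv (max_num - n) 10 + 1) ((quantidade.toNat : Int)) = quantidade := by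
          omega
        rw [this]
      · rw [if_neg hq]
        by_cases hq1 : 1 ≤ quantidade
        · rw [loopA_of_pos n quantidade _ [] (by simp; omega)]
          simp only [List.nil_append, List.length_nil, Nat.cast_zero, sub_zero]
          rw [hfil, hcnt, take_map_pyRange]
          have : min (PySem.Int.floordiv (max_num - n) 10 + 1) ((quantidade.toNat : Int)) =
              PySem.Int.floordiv (max_num - n) 10 + 1 := by
            omega
          rw [this]
        · rw [loopA_of_nonpos n quantidade (by omega), hfil, hcnt]
          simp
  · -- n is not a value i % 10 can take: the loop appends nothing
    rw [if_pos (Or.inl hn)]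
    have hnever : ∀ l acc, numerosLoopA n quantidade l acc = acc := by
      intro l
      induction l with
      | nil => intro acc; simp [numerosLoopA]
      | cons i rest ih =>
        intro acc
        have h0 : 0 ≤ PySem.Int.mod i 10 := PySem.Int.mod_nonneg i (by norm_num)
        have h2 : PySem.Int.mod i 10 < 10 := PySem.Int.mod_lt i (by norm_num)
        have h1 : ¬ (i % 10 = n) := by
          have := PySem.Int.mod_eq_emod_of_pos (a := i) (b := 10) (by norm_num)
          omega
        simp [numerosLoopA, h1, ih]
    rw [hnever]

-- ===== VERDICT (by name: the statement is the Claim_ definition above) =====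
theorem numeros_terminados_em_spec : Claim_equal_numeros_terminados_em := by
  intro n max_num quantidade _
  exact main_equiv n max_num quantidade
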